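-- pv_equiv track=rewrite | github.com/gunraj26/UBS_Team-Untitled | routes/operation_safegaurd.py | reverse_double_consonants
-- ===== SOURCE A (Python) =====
-- def reverse_double_consonants(text):
--     """Remove doubled consonants - handles multiple consecutive duplicates"""
--     vowels = set('aeiouAEIOU')
--     result = ""
--     i = 0
--     while i < len(text):
--         char = text[i]
--         if char.isalpha() and char not in vowels:
--             # Count consecutive occurrences of this consonant
--             count = 1
--             while i + count < len(text) and text[i + count] == char:
--                 count += 1
--
--             # Add only one instance of the consonant
--             result += char
--             i += count
--         else:
--             result += char
--             i += 1
--
--     return result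
-- ===== SOURCE B (Python) =====
-- def reverse_double_consonants(text):
--     """Remove doubled consonants - single flat pass comparing to previous char"""
--     vowels = set('aeiouAEIOU')
--     result = []
--     prev = None
--     for char in text:
--         if not (char.isalpha() and char not in vowels and char == prev):
--             result.append(char)
--         prev = char
--     return ''.join(result)
-- ===== Notes on version B (the rewrite author's own statement) =====
-- stated objective: simpler
-- what changed: Replaces A's index-jumping outer loop with an inner run-counting while loop by a single flat for-loop that appends each char unless it is a consonant equal to the previous text character.
import Mathlib
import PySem

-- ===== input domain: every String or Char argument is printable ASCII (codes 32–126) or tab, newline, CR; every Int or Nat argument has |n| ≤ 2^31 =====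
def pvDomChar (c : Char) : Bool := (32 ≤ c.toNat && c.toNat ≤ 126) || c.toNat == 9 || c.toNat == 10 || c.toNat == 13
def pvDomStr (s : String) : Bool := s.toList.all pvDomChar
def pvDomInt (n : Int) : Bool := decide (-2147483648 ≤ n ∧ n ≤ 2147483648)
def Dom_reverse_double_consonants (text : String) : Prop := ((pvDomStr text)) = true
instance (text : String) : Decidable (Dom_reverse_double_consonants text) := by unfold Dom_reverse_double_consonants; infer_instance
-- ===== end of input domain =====

-- B replaces A's index-jumping loop with inner run-counting by a flat pass comparing each char
-- to its predecessor (objective: simpler; same O(n) cost).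

-- shared consonant test: char.isalpha() and char not in vowels (both Pythons use this condition)
def pvIsCons (c : Char) : Bool :=
  PySem.Chars.isalpha c && !(("aeiouAEIOU".toList).contains c)

-- ===== PORT A =====
-- A's while loop over indices; skipping `count` equal chars is dropping the equal prefix of the rest
def pvGoA : List Char → List Char
  | [] => []
  | c :: rest =>
    if pvIsCons c then
      c :: pvGoA (rest.dropWhile (· == c))
    else
      c :: pvGoA rest
termination_by l => l.length
decreasing_by
  all_goals simp only [List.length_cons, Nat.lt_succ_iff]
  · exact List.length_dropWhile_le _ _
  · exact le_rfl

def reverse_double_consonants (text : String) : String :=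
  String.ofList (pvGoA text.toList)

-- ===== PORT B =====
-- B's flat pass: append unless consonant equal to prev; prev updated every step
def pvGoB : Option Char → List Char → List Char
  | _, [] => []
  | prev, c :: rest =>
    if pvIsCons c && (some c == prev) then
      pvGoB (some c) rest
    else
      c :: pvGoB (some c) rest

def reverse_double_consonants_alt (text : String) : String :=
  String.ofList (pvGoB none text.toList)

-- ===== PRECONDITION & SPEC =====
def Spec_reverse_double_consonants (text : String) (out : String) : Prop := out = reverse_double_consonants_alt text
instance (text : String) (out : String) : Decidable (Spec_reverse_double_consonants text out) := by unfold Spec_reverse_double_consonants; infer_instance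

-- ===== CLAIM (what is proved, stated in full; the proofs are below) =====
def Claim_equal_reverse_double_consonants : Prop := ∀ (text : String), Dom_reverse_double_consonants text → Spec_reverse_double_consonants text (reverse_double_consonants text)

-- ===== LEMMAS AND PROOFS =====

-- "prev is safe for l": the head of l is not a consonant equal to prev
def pvOk (prev : Option Char) (l : List Char) : Prop :=
  ∀ c rest, l = c :: rest → ¬(pvIsCons c = true ∧ some c = prev)

theorem pvOk_none (l : List Char) : pvOk none l := by
  intro c rest _ h
  exact Option.some_ne_none c h.2

theorem pvHead_dropWhile {p : Char → Bool} :
    ∀ (l : List Char) c rest, l.dropWhile p = c :: rest → p c = false := by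
  intro l
  induction l with
  | nil => intro c rest h; simp [List.dropWhile] at h
  | cons a t ih =>
    intro c rest h
    by_cases hp : p a = true
    · simp [List.dropWhile, hp] at h; exact ih c rest h
    · simp [List.dropWhile, hp] at h
      rw [← h.1]; simpa using hp

-- dropping a run of c's is invisible to goB when prev = some c and c is a consonant
theorem pvGoB_dropWhile (c : Char) (hc : pvIsCons c = true) :
    ∀ l : List Char, pvGoB (some c) (l.dropWhile (· == c)) = pvGoB (some c) l := by
  intro l
  induction l with
  | nil => rfl
  | cons a t ih =>
    by_cases ha : a = c
    · subst ha
      simp only [List.dropWhile, BEq.rfl]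
      rw [ih]
      simp [pvGoB, hc]
    · have : (a == c) = false := by simp [ha]
      simp [List.dropWhile, this]

theorem pvGoB_nil (prev : Option Char) : pvGoB prev [] = [] := by
  cases prev <;> rfl

theorem pvMain : ∀ (n : ℕ) (l : List Char) (prev : Option Char),
    l.length ≤ n → pvOk prev l → pvGoB prev l = pvGoA l := by
  intro n
  induction n with
  | zero =>
    intro l prev hlen _
    have : l = [] := List.eq_nil_of_length_eq_zero (Nat.le_zero.mp hlen)
    subst this; rw [pvGoB_nil prev, pvGoA]
  | succ n ih =>
    intro l prev hlen hok
    cases l with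
    | nil => rw [pvGoB_nil prev, pvGoA]
    | cons c rest =>
      have hskip : (pvIsCons c && (some c == prev)) = false := by
        by_cases h1 : pvIsCons c = true
        · have h2 : ¬ some c = prev := fun h => hok c rest rfl ⟨h1, h⟩
          simp [h1, h2]
        · simp [Bool.eq_false_iff.mpr h1]
      have hrestlen : rest.length ≤ n := Nat.lt_succ_iff.mp (by simpa using hlen)
      have hB : pvGoB prev (c :: rest) = c :: pvGoB (some c) rest := by
        simp [pvGoB, hskip]
      by_cases hc : pvIsCons c = true
      · -- consonant: A drops the run, B skips it step by step
        have hA : pvGoA (c :: rest) = c :: pvGoA (rest.dropWhile (· == c)) := by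
          rw [pvGoA]; simp [hc]
        rw [hB, hA, ← pvGoB_dropWhile c hc rest]
        congr 1
        apply ih
        · exact le_trans (List.length_dropWhile_le _ _) hrestlen
        · intro d drest hd hcontra
          have := pvHead_dropWhile rest d drest hd
          have : ¬ (d = c) := by simpa using this
          exact this (Option.some.inj hcontra.2)
      · -- non-consonant: both emit and move on
        have hA : pvGoA (c :: rest) = c :: pvGoA rest := by
          rw [pvGoA]; simp [hc]
        rw [hB, hA]
        congr 1
        apply ih rest (some c) hrestlen
        intro d drest hd hcontra
        have hdc : d = c := Option.some.inj hcontra.2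
        exact hc (hdc ▸ hcontra.1)

-- ===== VERDICT (by name: the statement is the Claim_ definition above) =====
theorem reverse_double_consonants_spec : Claim_equal_reverse_double_consonants := by
  intro text _
  unfold Spec_reverse_double_consonants reverse_double_consonants reverse_double_consonants_alt
  rw [pvMain text.toList.length text.toList none le_rfl (pvOk_none _)]
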